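-- pv_equiv track=rewrite | github.com/LampofDiogenes/Computer_security_homographs | cameronsqlinjectiondotpy.py | weak_mitigation
-- ===== SOURCE A (Python) =====
-- def generate_sql_string(username, password):
--     return f"SELECT * FROM users WHERE username = '{username}' AND password = '{password}'"
--
-- def weak_mitigation(username, password):
--     # setup
--     mitigated_username = ''
--     mitigated_password = ''
--
--     # if we find a blocked character in the username or password,
--     # stop adding the charaters to the mitigated version
--     for character in username:
--         if character == "'" or character == ';' or character == '-':
--             break
--         else:
--             mitigated_username += character
--
--     for character in password:
--         if character == "'" or character == ';' or character == '-':
--             break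
--         else:
--             mitigated_password += character
--
--     # return a generated string with the mitigated username and password.
--     return generate_sql_string(mitigated_username, mitigated_password)
-- ===== SOURCE B (Python) =====
-- def generate_sql_string(username, password):
--     return f"SELECT * FROM users WHERE username = '{username}' AND password = '{password}'"
--
-- def weak_mitigation(username, password):
--     # position-computing pass + one slice, instead of accumulating characters:
--     # find the index of the first blocked character (or the length) and cut there
--     blocked = set("';-")
--     def cut(s):
--         n = next((i for i, ch in enumerate(s) if ch in blocked), len(s))
--         return s[:n]
--     return generate_sql_string(cut(username), cut(password))
-- ===== Notes on version B (the rewrite author's own statement) =====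
-- stated objective: alternative
-- what changed: Replaces the accumulating char-by-char copy loops with a break by a position-computing pass: find the index of the first blocked character (default = length) and slice each string once.
import Mathlib
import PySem

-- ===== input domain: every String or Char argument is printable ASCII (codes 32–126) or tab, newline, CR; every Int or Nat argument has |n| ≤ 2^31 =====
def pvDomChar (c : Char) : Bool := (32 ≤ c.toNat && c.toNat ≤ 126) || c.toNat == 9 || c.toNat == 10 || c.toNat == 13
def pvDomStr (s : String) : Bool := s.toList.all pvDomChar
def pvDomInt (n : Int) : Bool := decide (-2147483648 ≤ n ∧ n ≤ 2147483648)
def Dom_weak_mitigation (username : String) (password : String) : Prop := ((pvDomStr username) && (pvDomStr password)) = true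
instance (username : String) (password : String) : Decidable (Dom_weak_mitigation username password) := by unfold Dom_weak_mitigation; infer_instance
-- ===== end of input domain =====

-- B replaces A's accumulating copy-until-break loops by a position-computing pass
-- (index of first blocked character) followed by a single slice; same cost, different decomposition.

-- ===== PORT A =====
def generate_sql_string (username : String) (password : String) : String :=
  "SELECT * FROM users WHERE username = '" ++ username ++ "' AND password = '" ++ password ++ "'"

-- the Python for-loop with break, as structural recursion over the characters with the accumulator
def pvMitLoop : List Char → String → String
  | [], acc => acc
  | c :: rest, acc =>
    if c = '\'' ∨ c = ';' ∨ c = '-' then acc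
    else pvMitLoop rest (acc.push c)

def weak_mitigation (username : String) (password : String) : String :=
  let mitigated_username := pvMitLoop username.toList ""
  let mitigated_password := pvMitLoop password.toList ""
  generate_sql_string mitigated_username mitigated_password

-- ===== PORT B =====
-- blocked = set("';-")
def pvBlockedSet : PySem.Set Char := PySem.Set.ofList ['\'', ';', '-']

-- cut: n = first index with s[i] in blocked, defaulting to len(s); then s[:n] (n is nonneg, so = take n)
def pvCut (s : String) : String :=
  let n := s.toList.findIdx (fun ch => pvBlockedSet.contains ch)
  String.ofList (s.toList.take n)

def weak_mitigation_alt (username : String) (password : String) : String :=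
  generate_sql_string (pvCut username) (pvCut password)

-- ===== PRECONDITION & SPEC =====
def Spec_weak_mitigation (username : String) (password : String) (out : String) : Prop := out = weak_mitigation_alt username password
instance (username : String) (password : String) (out : String) : Decidable (Spec_weak_mitigation username password out) := by unfold Spec_weak_mitigation; infer_instance

-- ===== CLAIM (what is proved, stated in full; the proofs are below) =====
def Claim_equal_weak_mitigation : Prop := ∀ (username : String) (password : String), Dom_weak_mitigation username password → Spec_weak_mitigation username password (weak_mitigation username password)

-- ===== LEMMAS AND PROOFS =====

-- A's loop appends exactly the characters before the first blocked one
theorem pvMitLoop_toList (l : List Char) (acc : String) :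
    (pvMitLoop l acc).toList = acc.toList ++ l.takeWhile (fun c => !(c = '\'' ∨ c = ';' ∨ c = '-' : Bool)) := by
  induction l generalizing acc with
  | nil => simp [pvMitLoop]
  | cons c rest ih =>
    by_cases h : c = '\'' ∨ c = ';' ∨ c = '-'
    · have hc : ¬(¬c = '\'' ∧ ¬c = ';' ∧ ¬c = '-') := by tauto
      simp [pvMitLoop, h, hc]
    · rw [pvMitLoop, if_neg h, ih, List.takeWhile_cons]
      rw [if_pos (by simp [h])]
      simp

-- take-to-first-match equals takeWhile-not
theorem take_findIdx_eq_takeWhile (p : Char → Bool) (l : List Char) :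
    l.take (l.findIdx p) = l.takeWhile (fun c => !p c) := by
  induction l with
  | nil => rfl
  | cons c rest ih =>
    by_cases h : p c
    · simp [List.findIdx_cons, h]
    · simp [List.findIdx_cons, h, ih]

-- the two blocked-character tests agree
theorem pvBlocked_eq (c : Char) :
    pvBlockedSet.contains c = (c = '\'' ∨ c = ';' ∨ c = '-' : Bool) := by
  by_cases h1 : c = '\'' <;> by_cases h2 : c = ';' <;> by_cases h3 : c = '-' <;>
    simp [pvBlockedSet, PySem.Set.ofList, PySem.Set.contains, h1, h2, h3]

theorem pvCut_eq_loop (s : String) : pvMitLoop s.toList "" = pvCut s := by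
  apply String.toList_inj.mp
  rw [pvMitLoop_toList, pvCut]
  simp only [take_findIdx_eq_takeWhile]
  have hp : (fun c => !pvBlockedSet.contains c) = (fun c => !(c = '\'' ∨ c = ';' ∨ c = '-' : Bool)) := by
    funext c; rw [pvBlocked_eq]
  rw [hp]
  simp

-- ===== VERDICT (by name: the statement is the Claim_ definition above) =====
theorem weak_mitigation_spec : Claim_equal_weak_mitigation := by
  intro u p _
  show _ = _
  unfold weak_mitigation weak_mitigation_alt
  rw [pvCut_eq_loop, pvCut_eq_loop]
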